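-- pv_equiv track=rewrite | github.com/kijindori/watchmark | recommender/preprocess_small.py | createGvector
-- ===== SOURCE A (Python) =====
-- def createGvector(s):
--     genres = ["Action","Adventure" ,"Animation" ,"Children\'s" ,"Comedy","Crime","Documentary","Drama","Fantasy","Film-Noir","Horror","Musical","Mystery","Romance","Sci-Fi","Thriller","War","Western"]
--     s = s.split('|')
--     gvector= ['0'] * len(genres)
--     for g in s:
--         if g in genres:
--             gvector[genres.index(g)] = "1"
--     return gvector
-- ===== SOURCE B (Python) =====
-- def createGvector(s):
--     genres = ["Action","Adventure" ,"Animation" ,"Children\'s" ,"Comedy","Crime","Documentary","Drama","Fantasy","Film-Noir","Horror","Musical","Mystery","Romance","Sci-Fi","Thriller","War","Western"]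
--     tokens = set(s.split('|'))
--     return ['1' if g in tokens else '0' for g in genres]
-- ===== Notes on version B (the rewrite author's own statement) =====
-- stated objective: idiomatic
-- what changed: Inverts A's scatter (iterate tokens, list.index into genres, write into a mutable vector) into a gather: build a set of the split tokens once and map over the fixed genres list testing membership.
import Mathlib
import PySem

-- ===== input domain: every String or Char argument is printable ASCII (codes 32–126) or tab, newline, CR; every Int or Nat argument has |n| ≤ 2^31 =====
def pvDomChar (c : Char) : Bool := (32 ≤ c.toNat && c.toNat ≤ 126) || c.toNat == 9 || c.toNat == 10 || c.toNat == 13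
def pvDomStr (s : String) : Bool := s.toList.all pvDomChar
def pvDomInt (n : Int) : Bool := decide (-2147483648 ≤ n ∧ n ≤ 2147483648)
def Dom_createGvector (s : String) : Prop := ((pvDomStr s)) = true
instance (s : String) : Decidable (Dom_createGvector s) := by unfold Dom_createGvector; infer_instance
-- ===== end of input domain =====

-- B replaces A's scatter (iterate tokens, list.index, write) by a gather over the genres list with a token set; same values on all inputs.

-- ===== PORT A =====
def pvGenres : List String := ["Action","Adventure","Animation","Children's","Comedy","Crime","Documentary","Drama","Fantasy","Film-Noir","Horror","Musical","Mystery","Romance","Sci-Fi","Thriller","War","Western"]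

-- s.split('|'): sep "|" is nonempty, so PySem.Str.split? always returns some; getD [] is never taken
def pvSplitPipe (s : String) : List String := (PySem.Str.split? s "|").getD []

def createGvector (s : String) : List String :=
  let toks := pvSplitPipe s
  toks.foldl (fun gv g =>
    if pvGenres.contains g then
      match PySem.List.index? pvGenres g with
      | some k => gv.set k "1"
      | none => gv
    else gv) (List.replicate pvGenres.length "0")

-- ===== PORT B =====
def createGvector_alt (s : String) : List String :=
  let tokens : PySem.Set String := PySem.Set.ofList (pvSplitPipe s)
  pvGenres.map (fun g => if PySem.Set.contains tokens g then "1" else "0")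

-- ===== PRECONDITION & SPEC =====
def Spec_createGvector (s : String) (out : List String) : Prop := out = createGvector_alt s
instance (s : String) (out : List String) : Decidable (Spec_createGvector s out) := by unfold Spec_createGvector; infer_instance

-- ===== CLAIM (what is proved, stated in full; the proofs are below) =====
def Claim_equal_createGvector : Prop := ∀ (s : String), Dom_createGvector s → Spec_createGvector s (createGvector s)

-- ===== LEMMAS AND PROOFS =====

-- the scatter loop body
def pvStep (gv : List String) (g : String) : List String :=
  if pvGenres.contains g then
    match PySem.List.index? pvGenres g with
    | some k => gv.set k "1"
    | none => gv
  else gv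

lemma pvStep_length (gv : List String) (g : String) : (pvStep gv g).length = gv.length := by
  unfold pvStep
  split_ifs with h
  · cases hk : PySem.List.index? pvGenres g <;> simp
  · rfl

lemma pvGenres_nodup : pvGenres.Nodup := by decide

lemma scatter_get? (toks : List String) (gv : List String)
    (hl : gv.length = pvGenres.length) (i : Nat) (hi : i < pvGenres.length) :
    (toks.foldl pvStep gv)[i]? = if pvGenres[i] ∈ toks then some "1" else gv[i]? := by
  induction toks generalizing gv with
  | nil => simp
  | cons t ts ih =>
    have hl' : (pvStep gv t).length = pvGenres.length := by rw [pvStep_length]; exact hl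
    rw [List.foldl_cons, ih (pvStep gv t) hl']
    by_cases hts : pvGenres[i] ∈ ts
    · simp [hts, List.mem_cons]
    · rw [if_neg hts]
      by_cases ht : t = pvGenres[i]
      · have hmemc : pvGenres[i] ∈ t :: ts := by rw [← ht]; exact List.mem_cons_self
        rw [if_pos hmemc]
        have htmem : t ∈ pvGenres := ht ▸ pvGenres.getElem_mem hi
        have hidx : PySem.List.index? pvGenres t = some i := by
          cases hk : PySem.List.index? pvGenres t with
          | none => exact absurd htmem ((PySem.List.index?_eq_none_iff pvGenres t).mp hk)
          | some k =>
            obtain ⟨hk', hgk, _⟩ := PySem.List.getElem_of_index?_eq_some hk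
            have hki : k = i :=
              (pvGenres_nodup.getElem_inj_iff (hi := hk') (hj := hi)).mp (hgk.trans ht)
            rw [hki]
        have hstep : pvStep gv t = gv.set i "1" := by
          unfold pvStep
          rw [if_pos (by simpa using htmem), hidx]
        rw [hstep]
        exact List.getElem?_set_self (by omega)
      · have hnotc : pvGenres[i] ∉ t :: ts := by
          simp only [List.mem_cons, not_or]
          exact ⟨fun h => ht h.symm, hts⟩
        rw [if_neg hnotc]
        unfold pvStep
        split_ifs with hmem
        · cases hk : PySem.List.index? pvGenres t with
          | none => rfl
          | some k =>
            obtain ⟨hk', hgk, _⟩ := PySem.List.getElem_of_index?_eq_some hk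
            have hki : k ≠ i := fun h => ht (by subst h; exact hgk.symm)
            exact List.getElem?_set_ne hki
        · rfl

-- ===== VERDICT (by name: the statement is the Claim_ definition above) =====
theorem createGvector_spec : Claim_equal_createGvector := by
  intro s _
  unfold Spec_createGvector createGvector createGvector_alt
  apply List.ext_getElem?
  intro i
  by_cases hi : i < pvGenres.length
  · have hA := scatter_get? (pvSplitPipe s) (List.replicate pvGenres.length "0")
      (by simp) i hi
    show (List.foldl pvStep _ _)[i]? = _
    rw [hA]
    rw [List.getElem?_map, List.getElem?_eq_getElem hi]
    simp only [Option.map_some]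
    by_cases hmem : pvGenres[i] ∈ pvSplitPipe s
    · simp [hmem, PySem.Set.contains, PySem.Set.mem_ofList]
    · simp [hmem, PySem.Set.contains, PySem.Set.mem_ofList, hi]
  · have h1 : (List.foldl pvStep (List.replicate pvGenres.length "0") (pvSplitPipe s)).length = pvGenres.length := by
      have : ∀ (l : List String) gv, (List.foldl pvStep gv l).length = gv.length := by
        intro l
        induction l with
        | nil => intro gv; rfl
        | cons t ts ih => intro gv; rw [List.foldl_cons, ih, pvStep_length]
      rw [this]; simp
    show (List.foldl pvStep _ _)[i]? = _
    rw [List.getElem?_eq_none (by rw [h1]; omega),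
        List.getElem?_eq_none (by rw [List.length_map]; omega)]
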